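-- pv_equiv track=rewrite | github.com/jagoff/rag-obsidian | rag/conversation_distiller.py | _extract_bot_answer
-- ===== SOURCE A (Python) =====
-- def _extract_bot_answer(turn_text: str) -> tuple[str, str]:
--     """Return ``(user_query, bot_answer)``. User query = primera línea
--     blockquote (``> ...``); bot answer = todo lo no-blockquote post-header,
--     sin la línea final ``**Sources**:``.
--     """
--     lines = turn_text.splitlines()
--     # Header line + skip blank
--     user_q = ""
--     bot_lines: list[str] = []
--     seen_header = False
--     for line in lines:
--         if not seen_header and line.startswith("## Turn"):
--             seen_header = True
--             continue
--         if line.startswith("> ") or line.strip() == ">":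
--             if not user_q:
--                 user_q = line.lstrip("> ").strip()
--             continue
--         if line.startswith("**Sources**"):
--             break  # corta el bot answer
--         bot_lines.append(line)
--     answer = "\n".join(bot_lines).strip()
--     return user_q, answer
-- ===== SOURCE B (Python) =====
-- def _extract_bot_answer(turn_text: str) -> tuple[str, str]:
--     lines = turn_text.splitlines()
--     # keep only the portion before the first '**Sources**' line
--     cut = next((i for i, l in enumerate(lines) if l.startswith("**Sources**")), len(lines))
--     lines = lines[:cut]
--     # drop the first '## Turn' header line, if any
--     hdr = next((i for i, l in enumerate(lines) if l.startswith("## Turn")), None)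
--     if hdr is not None:
--         del lines[hdr]
--
--     def is_bq(l):
--         return l.startswith("> ") or l.strip() == ">"
--
--     queries = [l.lstrip("> ").strip() for l in lines if is_bq(l)]
--     user_q = next((q for q in queries if q), "")
--     answer = "\n".join(l for l in lines if not is_bq(l)).strip()
--     return user_q, answer
-- ===== Notes on version B (the rewrite author's own statement) =====
-- stated objective: alternative
-- what changed: Replaces A's single early-break state-machine scan (header flag, query latch, accumulator) with independent passes: truncate the line list at the first sources-marker line, delete the first turn-header line, then take the first nonempty-stripped blockquote as the query and join the non-blockquote lines as the answer.
import Mathlib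
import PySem

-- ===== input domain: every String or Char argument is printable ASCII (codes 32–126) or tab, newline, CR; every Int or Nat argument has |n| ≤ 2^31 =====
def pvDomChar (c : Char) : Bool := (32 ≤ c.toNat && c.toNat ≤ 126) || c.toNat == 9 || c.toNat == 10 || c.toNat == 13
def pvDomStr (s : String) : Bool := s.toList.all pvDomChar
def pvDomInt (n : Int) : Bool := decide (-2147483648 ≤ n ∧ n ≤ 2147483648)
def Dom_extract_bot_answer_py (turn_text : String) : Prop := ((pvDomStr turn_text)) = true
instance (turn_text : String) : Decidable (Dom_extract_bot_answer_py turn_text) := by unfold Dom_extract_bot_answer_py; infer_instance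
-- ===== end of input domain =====

-- B replaces A's single early-break state-machine scan by independent passes (truncate at the sources
-- marker, delete the first header line, then blockquote/non-blockquote partition): alternative decomposition, same cost.

-- hand port of Python's str.lstrip("> ") (drop the chars '>' and ' ' from the left);
-- exact: lstrip with an explicit char set removes exactly the leading chars in the set
def lstripGtSp (s : String) : String :=
  String.ofList (s.toList.dropWhile (fun c => c == '>' || c == ' '))

-- ===== PORT A =====
def extractLoop (lines : List String) (user_q : String) (bot_lines : List String)
    (seen_header : Bool) : String × List String :=
  match lines with
  | [] => (user_q, bot_lines)
  | line :: rest =>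
    if !seen_header && PySem.Str.startswith line "## Turn" then
      extractLoop rest user_q bot_lines true
    else if PySem.Str.startswith line "> " || PySem.Str.strip line == ">" then
      extractLoop rest (if user_q == "" then PySem.Str.strip (lstripGtSp line) else user_q)
        bot_lines seen_header
    else if PySem.Str.startswith line "**Sources**" then
      (user_q, bot_lines)
    else
      extractLoop rest user_q (bot_lines ++ [line]) seen_header

def extract_bot_answer_py (turn_text : String) : String × String :=
  let lines := PySem.Str.splitlines turn_text
  let r := extractLoop lines "" [] false
  (r.1, PySem.Str.strip (PySem.Str.join "\n" r.2))

-- ===== PORT B =====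
def pvIsBq (l : String) : Bool :=
  PySem.Str.startswith l "> " || PySem.Str.strip l == ">"

-- lines[:cut] where cut = index of the first '**Sources**' line (len(lines) if none)
def truncB (L : List String) : List String :=
  L.take (L.findIdx (fun l => PySem.Str.startswith l "**Sources**"))

-- del lines[hdr] for the first '## Turn' line, if any
def dropHdrB (L : List String) : List String :=
  let h := L.findIdx (fun l => PySem.Str.startswith l "## Turn")
  if h < L.length then L.eraseIdx h else L

def extract_bot_answer_py_alt (turn_text : String) : String × String :=
  let lines := dropHdrB (truncB (PySem.Str.splitlines turn_text))
  let queries := (lines.filter pvIsBq).map (fun l => PySem.Str.strip (lstripGtSp l))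
  let user_q := (queries.find? (fun q => !(q == ""))).getD ""
  let answer := PySem.Str.strip (PySem.Str.join "\n" (lines.filter (fun l => !pvIsBq l)))
  (user_q, answer)

-- ===== PRECONDITION & SPEC =====
def Spec_extract_bot_answer_py (turn_text : String) (out : String × String) : Prop := out = extract_bot_answer_py_alt turn_text
instance (turn_text : String) (out : String × String) : Decidable (Spec_extract_bot_answer_py turn_text out) := by unfold Spec_extract_bot_answer_py; infer_instance

-- ===== CLAIM (what is proved, stated in full; the proofs are below) =====
def Claim_equal_extract_bot_answer_py : Prop := ∀ (turn_text : String), Dom_extract_bot_answer_py turn_text → Spec_extract_bot_answer_py turn_text (extract_bot_answer_py turn_text)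

-- ===== LEMMAS AND PROOFS =====

-- user-query accumulator of B's passes, parametrised by A's running value
def uqOf (uq : String) (L : List String) : String :=
  if uq == "" then
    ((((L.filter pvIsBq).map (fun l => PySem.Str.strip (lstripGtSp l))).find?
        (fun q => !(q == ""))).getD "")
  else uq

theorem uqOf_nil (uq : String) : uqOf uq [] = uq := by
  unfold uqOf; split <;> simp_all

theorem uqOf_cons_bq (uq l : String) (T : List String) (hbq : pvIsBq l = true) :
    uqOf (if uq == "" then PySem.Str.strip (lstripGtSp l) else uq) T = uqOf uq (l :: T) := by
  unfold uqOf
  rw [List.filter_cons, if_pos hbq, List.map_cons]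
  by_cases h : uq = ""
  · subst h
    by_cases hq : PySem.Str.strip (lstripGtSp l) = ""
    · rw [List.find?_cons_of_neg (by simp [hq])]
      simp [hq]
    · rw [List.find?_cons_of_pos (by simp [hq])]
      simp [hq]
  · simp [h]

theorem uqOf_cons_not_bq (uq l : String) (T : List String) (hbq : pvIsBq l = false) :
    uqOf uq (l :: T) = uqOf uq T := by
  unfold uqOf
  rw [List.filter_cons, if_neg (show ¬(pvIsBq l = true) by simp [hbq])]

theorem rstrip_prefix (cs : List Char) : PySem.Chars.rstrip cs <+: cs := by
  have h := List.dropWhile_suffix (l := cs.reverse) PySem.Chars.isspace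
  have h2 := List.reverse_prefix.mpr h
  simpa [PySem.Chars.rstrip] using h2

theorem strip_cons_head {c : Char} {t : List Char} (hc : PySem.Chars.isspace c = false) :
    PySem.Chars.strip (c :: t) = [] ∨ ∃ t', PySem.Chars.strip (c :: t) = c :: t' := by
  unfold PySem.Chars.strip PySem.Chars.lstrip
  rw [List.dropWhile_cons_of_neg (by simp [hc])]
  cases h : PySem.Chars.rstrip (c :: t) with
  | nil => exact Or.inl rfl
  | cons d t' =>
    right
    have hp : d :: t' <+: c :: t := h ▸ rstrip_prefix (c :: t)
    obtain ⟨hd, -⟩ := List.cons_prefix_cons.mp hp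
    exact ⟨t', by rw [hd]⟩

theorem startswith_head {l p : String} {c : Char} {rest : List Char}
    (hp : p.toList = c :: rest) (h : PySem.Str.startswith l p = true) :
    ∃ t, l.toList = c :: t := by
  have hpre := (PySem.Chars.startswith_iff _ _).mp (by simpa [PySem.Str.startswith] using h)
  rw [hp] at hpre
  obtain ⟨s, hs⟩ := hpre
  exact ⟨rest ++ s, by rw [← hs]; simp⟩

theorem not_src_of_bq (l : String)
    (h : (PySem.Str.startswith l "> " || PySem.Str.strip l == ">") = true) :
    PySem.Str.startswith l "**Sources**" = false := by
  by_contra hsrc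
  rw [Bool.not_eq_false] at hsrc
  obtain ⟨t, ht⟩ := startswith_head (p := "**Sources**")
    (by decide : ("**Sources**" : String).toList = '*' :: ['*','S','o','u','r','c','e','s','*','*']) hsrc
  rcases Bool.or_eq_true_iff.mp h with hb | hb
  · obtain ⟨t', ht'⟩ := startswith_head (p := "> ")
      (by decide : ("> " : String).toList = '>' :: [' ']) hb
    rw [ht] at ht'; injection ht' with h1; exact absurd h1 (by decide)
  · have he : PySem.Str.strip l = ">" := by simpa using hb
    have hts : PySem.Chars.strip l.toList = ['>'] := by
      have := congrArg String.toList he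
      simpa using this
    rw [ht] at hts
    rcases strip_cons_head (c := '*') (t := t) (by decide) with h0 | ⟨t2, h2⟩
    · rw [h0] at hts; exact absurd hts (by simp)
    · rw [h2] at hts; injection hts with h1; exact absurd h1 (by decide)

theorem not_src_of_hdr (l : String) (h : PySem.Str.startswith l "## Turn" = true) :
    PySem.Str.startswith l "**Sources**" = false := by
  by_contra hsrc
  rw [Bool.not_eq_false] at hsrc
  obtain ⟨t, ht⟩ := startswith_head (p := "**Sources**")
    (by decide : ("**Sources**" : String).toList = '*' :: ['*','S','o','u','r','c','e','s','*','*']) hsrc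
  obtain ⟨t', ht'⟩ := startswith_head (p := "## Turn")
    (by decide : ("## Turn" : String).toList = '#' :: ['#',' ','T','u','r','n']) h
  rw [ht] at ht'; injection ht' with h1; exact absurd h1 (by decide)

theorem truncB_cons_not_src (l : String) (L : List String)
    (h : PySem.Str.startswith l "**Sources**" = false) :
    truncB (l :: L) = l :: truncB L := by
  unfold truncB
  simp only [List.findIdx_cons, h, cond_false, List.take_succ_cons]

theorem truncB_cons_src (l : String) (L : List String)
    (h : PySem.Str.startswith l "**Sources**" = true) :
    truncB (l :: L) = [] := by
  unfold truncB
  simp only [List.findIdx_cons, h, cond_true, List.take_zero]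

theorem dropHdrB_cons_hdr (l : String) (L : List String)
    (h : PySem.Str.startswith l "## Turn" = true) :
    dropHdrB (l :: L) = L := by
  unfold dropHdrB
  simp only [List.findIdx_cons, h, cond_true, List.length_cons]
  rw [if_pos (by omega), List.eraseIdx_cons_zero]

theorem dropHdrB_cons_not_hdr (l : String) (L : List String)
    (h : PySem.Str.startswith l "## Turn" = false) :
    dropHdrB (l :: L) = l :: dropHdrB L := by
  unfold dropHdrB
  simp only [List.findIdx_cons, h, cond_false, List.length_cons]
  by_cases hlt : L.findIdx (fun l => PySem.Str.startswith l "## Turn") < L.length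
  · rw [if_pos (by omega), if_pos hlt, List.eraseIdx_cons_succ]
  · rw [if_neg (by omega), if_neg hlt]

theorem filter_nbq_cons_bq (l : String) (T : List String) (hbq : pvIsBq l = true) :
    T.filter (fun l => !pvIsBq l) = (l :: T).filter (fun l => !pvIsBq l) := by
  rw [List.filter_cons, if_neg (show ¬((!pvIsBq l) = true) by simp [hbq])]

theorem filter_nbq_cons_not_bq (l : String) (T : List String) (hbq : pvIsBq l = false) :
    (l :: T).filter (fun l => !pvIsBq l) = l :: T.filter (fun l => !pvIsBq l) := by
  rw [List.filter_cons, if_pos (show (!pvIsBq l) = true by simp [hbq])]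

theorem loop_true (L : List String) (uq : String) (acc : List String) :
    extractLoop L uq acc true =
      (uqOf uq (truncB L), acc ++ (truncB L).filter (fun l => !pvIsBq l)) := by
  induction L generalizing uq acc with
  | nil => simp [extractLoop, truncB, uqOf_nil]
  | cons l rest ih =>
    by_cases h2 : (PySem.Str.startswith l "> " || PySem.Str.strip l == ">") = true
    · have step : extractLoop (l :: rest) uq acc true
          = extractLoop rest (if uq == "" then PySem.Str.strip (lstripGtSp l) else uq) acc true := by
        simp only [extractLoop]
        rw [if_neg (show ¬((!true && PySem.Str.startswith l "## Turn") = true) by simp),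
          if_pos h2]
      rw [step, ih, truncB_cons_not_src l rest (not_src_of_bq l h2),
        uqOf_cons_bq uq l (truncB rest) h2, ← filter_nbq_cons_bq l (truncB rest) h2]
    · rw [Bool.not_eq_true] at h2
      by_cases h3 : PySem.Str.startswith l "**Sources**" = true
      · have step : extractLoop (l :: rest) uq acc true = (uq, acc) := by
          simp only [extractLoop]
          rw [if_neg (show ¬((!true && PySem.Str.startswith l "## Turn") = true) by simp),
            if_neg (show ¬((PySem.Str.startswith l "> " || PySem.Str.strip l == ">") = true) by rw [h2]; decide),
            if_pos h3]
        rw [step, truncB_cons_src l rest h3]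
        simp [uqOf_nil]
      · rw [Bool.not_eq_true] at h3
        have step : extractLoop (l :: rest) uq acc true
            = extractLoop rest uq (acc ++ [l]) true := by
          simp only [extractLoop]
          rw [if_neg (show ¬((!true && PySem.Str.startswith l "## Turn") = true) by simp),
            if_neg (show ¬((PySem.Str.startswith l "> " || PySem.Str.strip l == ">") = true) by rw [h2]; decide),
            if_neg (show ¬(PySem.Str.startswith l "**Sources**" = true) by rw [h3]; decide)]
        rw [step, ih, truncB_cons_not_src l rest h3,
          uqOf_cons_not_bq uq l (truncB rest) h2,
          filter_nbq_cons_not_bq l (truncB rest) h2]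
        simp

theorem loop_false (L : List String) (uq : String) (acc : List String) :
    extractLoop L uq acc false =
      (uqOf uq (dropHdrB (truncB L)),
       acc ++ (dropHdrB (truncB L)).filter (fun l => !pvIsBq l)) := by
  induction L generalizing uq acc with
  | nil => simp [extractLoop, truncB, dropHdrB, uqOf_nil]
  | cons l rest ih =>
    by_cases h1 : PySem.Str.startswith l "## Turn" = true
    · have step : extractLoop (l :: rest) uq acc false = extractLoop rest uq acc true := by
        simp only [extractLoop]
        rw [if_pos (show (!false && PySem.Str.startswith l "## Turn") = true by rw [h1]; decide)]
      rw [step, truncB_cons_not_src l rest (not_src_of_hdr l h1),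
        dropHdrB_cons_hdr l (truncB rest) h1]
      exact loop_true rest uq acc
    · rw [Bool.not_eq_true] at h1
      by_cases h2 : (PySem.Str.startswith l "> " || PySem.Str.strip l == ">") = true
      · have step : extractLoop (l :: rest) uq acc false
            = extractLoop rest (if uq == "" then PySem.Str.strip (lstripGtSp l) else uq) acc false := by
          simp only [extractLoop]
          rw [if_neg (show ¬((!false && PySem.Str.startswith l "## Turn") = true) by rw [h1]; decide),
            if_pos h2]
        rw [step, ih, truncB_cons_not_src l rest (not_src_of_bq l h2),
          dropHdrB_cons_not_hdr l (truncB rest) h1,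
          uqOf_cons_bq uq l (dropHdrB (truncB rest)) h2,
          ← filter_nbq_cons_bq l (dropHdrB (truncB rest)) h2]
      · rw [Bool.not_eq_true] at h2
        by_cases h3 : PySem.Str.startswith l "**Sources**" = true
        · have step : extractLoop (l :: rest) uq acc false = (uq, acc) := by
            simp only [extractLoop]
            rw [if_neg (show ¬((!false && PySem.Str.startswith l "## Turn") = true) by rw [h1]; decide),
              if_neg (show ¬((PySem.Str.startswith l "> " || PySem.Str.strip l == ">") = true) by rw [h2]; decide),
              if_pos h3]
          rw [step, truncB_cons_src l rest h3]
          simp [dropHdrB, uqOf_nil]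
        · rw [Bool.not_eq_true] at h3
          have step : extractLoop (l :: rest) uq acc false
              = extractLoop rest uq (acc ++ [l]) false := by
            simp only [extractLoop]
            rw [if_neg (show ¬((!false && PySem.Str.startswith l "## Turn") = true) by rw [h1]; decide),
              if_neg (show ¬((PySem.Str.startswith l "> " || PySem.Str.strip l == ">") = true) by rw [h2]; decide),
              if_neg (show ¬(PySem.Str.startswith l "**Sources**" = true) by rw [h3]; decide)]
          rw [step, ih, truncB_cons_not_src l rest h3,
            dropHdrB_cons_not_hdr l (truncB rest) h1,
            uqOf_cons_not_bq uq l (dropHdrB (truncB rest)) h2,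
            filter_nbq_cons_not_bq l (dropHdrB (truncB rest)) h2]
          simp

-- ===== VERDICT (by name: the statement is the Claim_ definition above) =====
theorem extract_bot_answer_py_spec : Claim_equal_extract_bot_answer_py := by
  intro turn_text _
  show extract_bot_answer_py turn_text = extract_bot_answer_py_alt turn_text
  simp only [extract_bot_answer_py, extract_bot_answer_py_alt]
  rw [loop_false]
  simp [uqOf]
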